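-- pv_equiv track=rewrite | github.com/pablo27207/services | web_app/blueprints/stations_bp.py | _normalizar_clave
-- ===== SOURCE A (Python) =====
-- def _normalizar_clave(variable_name, sensor_name):
--     texto = f"{(variable_name or '').strip().lower()} {(sensor_name or '').strip().lower()}"
--     if "bar" in texto and "bar_trend" not in texto:
--         return "barometric_pressure"
--     if "dew_point_out" in texto or "dew point out" in texto:
--         return "dew_point_outdoor"
--     if "heat_index_out" in texto or "heat index out" in texto:
--         return "heat_index_outdoor"
--     if "temp_in" in texto or "indoor" in texto:
--         return "indoor_temperature"
--     if "temp_out" in texto or "outdoor temperature" in texto: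
--         return "outdoor_temperature"
--     if "rainfall" in texto or "rain" in texto:
--         return "rainfall"
--     if "wind_chill" in texto:
--         return "wind_chill"
--     if "wind_dir_of_prevail" in texto or "wind direction" in texto or "wind_dir" in texto:
--         return "wind_direction"
--     if "wind_speed_avg" in texto or "wind speed avg" in texto:
--         return "wind_speed_avg"
--     if "wind_speed" in texto or "wind speed" in texto:
--         return "wind_speed"
--     if "hum_out" in texto or "humidity out" in texto or "humedad exterior" in texto:
--         return "outdoor_humidity"
--     clave = (sensor_name or variable_name or "unknown").replace(" ", "_").replace("-", "_").replace("/", "_")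
--     while "__" in clave:
--         clave = clave.replace("__", "_")
--     return clave.strip("_")
-- ===== SOURCE B (Python) =====
-- _RULES = [
--     (("bar",), ("bar_trend",), "barometric_pressure"),
--     (("dew_point_out", "dew point out"), (), "dew_point_outdoor"),
--     (("heat_index_out", "heat index out"), (), "heat_index_outdoor"),
--     (("temp_in", "indoor"), (), "indoor_temperature"),
--     (("temp_out", "outdoor temperature"), (), "outdoor_temperature"),
--     (("rainfall", "rain"), (), "rainfall"),
--     (("wind_chill",), (), "wind_chill"),
--     (("wind_dir_of_prevail", "wind direction", "wind_dir"), (), "wind_direction"),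
--     (("wind_speed_avg", "wind speed avg"), (), "wind_speed_avg"),
--     (("wind_speed", "wind speed"), (), "wind_speed"),
--     (("hum_out", "humidity out", "humedad exterior"), (), "outdoor_humidity"),
-- ]
--
-- def _normalizar_clave(variable_name, sensor_name):
--     texto = f"{(variable_name or '').strip().lower()} {(sensor_name or '').strip().lower()}"
--     for pos, neg, key in _RULES:
--         if any(p in texto for p in pos) and not any(n in texto for n in neg):
--             return key
--     base = sensor_name or variable_name or "unknown"
--     # split base on separators, drop empty pieces, join with single underscores
--     parts = []
--     cur = ""
--     for ch in base:
--         if ch in " -/_":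
--             if cur:
--                 parts.append(cur)
--             cur = ""
--         else:
--             cur += ch
--     if cur:
--         parts.append(cur)
--     return "_".join(parts)
-- ===== Notes on version B (the rewrite author's own statement) =====
-- stated objective: simpler
-- what changed: The eleven hard-coded if-branches become a first-match scan over a declarative rule table (positive/negative substring tuples), and the replace/while-collapse/strip fallback becomes a single split-on-separators-and-join pass over the name.
import Mathlib
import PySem

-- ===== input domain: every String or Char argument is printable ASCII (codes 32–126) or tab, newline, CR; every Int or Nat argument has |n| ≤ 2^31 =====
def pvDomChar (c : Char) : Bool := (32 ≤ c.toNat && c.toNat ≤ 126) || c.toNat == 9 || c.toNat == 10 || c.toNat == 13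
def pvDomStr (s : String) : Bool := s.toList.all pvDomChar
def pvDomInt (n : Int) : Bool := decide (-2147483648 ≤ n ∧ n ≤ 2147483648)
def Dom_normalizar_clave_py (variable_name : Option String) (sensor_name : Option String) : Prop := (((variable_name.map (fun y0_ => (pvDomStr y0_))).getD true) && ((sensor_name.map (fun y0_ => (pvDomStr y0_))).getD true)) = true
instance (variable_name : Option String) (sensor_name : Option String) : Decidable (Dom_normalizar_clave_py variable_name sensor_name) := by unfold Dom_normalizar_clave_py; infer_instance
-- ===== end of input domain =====

-- B replaces A's eleven-branch if-chain by a data-driven first-match scan over a rule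
-- table, and replaces A's replace/while-collapse/strip fallback by a single split-on-
-- separators-and-join pass; objective: simpler (one mechanism per half, no fixpoint loop).

-- ===== PORT A =====
-- Python truthiness of `opt or dflt` for an optional string (None and "" are falsy).
def pyOrStr (o : Option String) (dflt : String) : String :=
  match o with
  | none => dflt
  | some s => if s.toList = [] then dflt else s

-- the `texto` both Pythons build: f"{(variable_name or '').strip().lower()} {(sensor_name or '').strip().lower()}"
def textoOf (variable_name : Option String) (sensor_name : Option String) : List Char :=
  PySem.Chars.lower (PySem.Chars.strip (pyOrStr variable_name "").toList)
    ++ ' ' :: PySem.Chars.lower (PySem.Chars.strip (pyOrStr sensor_name "").toList)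

-- helper for the termination proof of the while loop below: one pass of
-- clave.replace("__", "_") written structurally (left-to-right, non-overlapping)
def collapse2 : List Char → List Char
| [] => []
| [c] => [c]
| c :: d :: t => if c = '_' ∧ d = '_' then '_' :: collapse2 t else c :: collapse2 (d :: t)

theorem collapse2_length_le (l : List Char) : (collapse2 l).length ≤ l.length := by
  fun_induction collapse2 l with
  | case1 => simp
  | case2 => simp
  | case3 c d t h ih => simp only [collapse2, if_pos h, List.length_cons]; omega
  | case4 c d t h ih => simp only [collapse2, if_neg h, List.length_cons]; simpa using ih

theorem collapse2_length_lt (l : List Char) (h : ['_','_'] <:+: l) :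
    (collapse2 l).length < l.length := by
  fun_induction collapse2 l with
  | case1 => simp at h
  | case2 c =>
    exfalso
    obtain ⟨pre, suf, hps⟩ := h
    rcases pre with _ | ⟨a, pre⟩ <;> simp_all
  | case3 c d t hcd ih =>
    have := collapse2_length_le t
    simp only [collapse2, if_pos hcd, List.length_cons]; omega
  | case4 c d t hcd ih =>
    have h' : ['_','_'] <:+: d :: t := by
      rcases (List.infix_cons_iff).1 h with hp | hi
      · exfalso
        obtain ⟨suf, hs⟩ := hp
        apply hcd
        constructor <;> [skip; skip] <;> injection hs with h1 h2 <;> [exact h1.symm; skip]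
        injection h2 with h3 _; exact h3.symm
      · exact hi
    simp only [collapse2, if_neg hcd, List.length_cons]
    exact Nat.succ_lt_succ (ih h')

theorem go2_eq (fuel : Nat) : ∀ (l acc : List Char), l.length ≤ fuel →
    PySem.Chars.replace.go ['_','_'] ['_'] fuel l acc = acc.reverse ++ collapse2 l := by
  induction fuel with
  | zero =>
    intro l acc h
    have : l = [] := by cases l <;> simp_all
    subst this; simp [PySem.Chars.replace.go, collapse2]
  | succ n ih =>
    intro l acc h
    match l with
    | [] => simp [PySem.Chars.replace.go, collapse2]
    | [c] =>
      simp only [PySem.Chars.replace.go]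
      have h1 : (['_','_'].isPrefixOf [c]) = false := by simp [List.isPrefixOf]
      rw [h1]
      simp only [Bool.false_eq_true, if_false]
      rw [ih [] _ (by simp)]
      simp [collapse2]
    | c :: d :: t =>
      simp only [List.length_cons] at h
      rw [PySem.Chars.replace.go]
      by_cases hcd : c = '_' ∧ d = '_'
      · obtain ⟨h1, h2⟩ := hcd; subst h1; subst h2
        have h1 : (['_','_'].isPrefixOf ('_' :: '_' :: t)) = true := by simp [List.isPrefixOf]
        rw [h1, if_pos rfl,
          show List.drop ['_','_'].length ('_' :: '_' :: t) = t from rfl,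
          ih _ _ (by omega)]
        simp [collapse2]
      · have h1 : (['_','_'].isPrefixOf (c :: d :: t)) = false := by
          simp only [List.isPrefixOf, Bool.and_eq_false_iff, beq_eq_false_iff_ne, ne_eq]
          by_cases hc : c = '_'
          · right; left
            subst hc
            exact fun hh => hcd ⟨rfl, hh.symm⟩
          · left; exact fun hh => hc hh.symm
        rw [h1]
        simp only [Bool.false_eq_true, if_false]
        rw [ih _ _ (by simp only [List.length_cons]; omega)]
        simp [collapse2, hcd]

theorem replace2_eq (l : List Char) :
    PySem.Chars.replace l ['_','_'] ['_'] = collapse2 l := by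
  simp [PySem.Chars.replace, go2_eq l.length l [] le_rfl]

-- port of:  while "__" in clave: clave = clave.replace("__", "_")
def whileCollapse (clave : List Char) : List Char :=
  if PySem.Chars.isIn ['_','_'] clave then whileCollapse (PySem.Chars.replace clave ['_','_'] ['_'])
  else clave
termination_by clave.length
decreasing_by
  rw [replace2_eq]
  exact collapse2_length_lt _ ((PySem.Chars.isIn_iff_infix _ _).1 (by assumption))

def normalizar_clave_py (variable_name : Option String) (sensor_name : Option String) : String :=
  let t := textoOf variable_name sensor_name
  if PySem.Chars.isIn "bar".toList t && !PySem.Chars.isIn "bar_trend".toList t then "barometric_pressure"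
  else if PySem.Chars.isIn "dew_point_out".toList t || PySem.Chars.isIn "dew point out".toList t then "dew_point_outdoor"
  else if PySem.Chars.isIn "heat_index_out".toList t || PySem.Chars.isIn "heat index out".toList t then "heat_index_outdoor"
  else if PySem.Chars.isIn "temp_in".toList t || PySem.Chars.isIn "indoor".toList t then "indoor_temperature"
  else if PySem.Chars.isIn "temp_out".toList t || PySem.Chars.isIn "outdoor temperature".toList t then "outdoor_temperature"
  else if PySem.Chars.isIn "rainfall".toList t || PySem.Chars.isIn "rain".toList t then "rainfall"
  else if PySem.Chars.isIn "wind_chill".toList t then "wind_chill"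
  else if PySem.Chars.isIn "wind_dir_of_prevail".toList t || PySem.Chars.isIn "wind direction".toList t || PySem.Chars.isIn "wind_dir".toList t then "wind_direction"
  else if PySem.Chars.isIn "wind_speed_avg".toList t || PySem.Chars.isIn "wind speed avg".toList t then "wind_speed_avg"
  else if PySem.Chars.isIn "wind_speed".toList t || PySem.Chars.isIn "wind speed".toList t then "wind_speed"
  else if PySem.Chars.isIn "hum_out".toList t || PySem.Chars.isIn "humidity out".toList t || PySem.Chars.isIn "humedad exterior".toList t then "outdoor_humidity"
  else
    let clave :=
      PySem.Chars.replace (PySem.Chars.replace (PySem.Chars.replace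
        (pyOrStr sensor_name (pyOrStr variable_name "unknown")).toList
        [' '] ['_']) ['-'] ['_']) ['/'] ['_']
    String.mk (PySem.Chars.stripChars (whileCollapse clave) ['_'])

-- ===== PORT B =====
-- the rule table of Source B: (positive substrings, negative substrings, key)
def ruleTable : List (List (List Char) × List (List Char) × String) :=
  [ (["bar".toList], ["bar_trend".toList], "barometric_pressure"),
    (["dew_point_out".toList, "dew point out".toList], [], "dew_point_outdoor"),
    (["heat_index_out".toList, "heat index out".toList], [], "heat_index_outdoor"),
    (["temp_in".toList, "indoor".toList], [], "indoor_temperature"),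
    (["temp_out".toList, "outdoor temperature".toList], [], "outdoor_temperature"),
    (["rainfall".toList, "rain".toList], [], "rainfall"),
    (["wind_chill".toList], [], "wind_chill"),
    (["wind_dir_of_prevail".toList, "wind direction".toList, "wind_dir".toList], [], "wind_direction"),
    (["wind_speed_avg".toList, "wind speed avg".toList], [], "wind_speed_avg"),
    (["wind_speed".toList, "wind speed".toList], [], "wind_speed"),
    (["hum_out".toList, "humidity out".toList, "humedad exterior".toList], [], "outdoor_humidity") ]

-- the for-loop with early return over the rule table
def findRule : List (List (List Char) × List (List Char) × String) → List Char → Option String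
| [], _ => none
| (pos, neg, key) :: rest, t =>
  if pos.any (fun p => PySem.Chars.isIn p t) && !(neg.any (fun n => PySem.Chars.isIn n t))
  then some key else findRule rest t

def sepChars : List Char := [' ', '-', '/', '_']

-- one step of Source B's character loop: state = (parts so far, current piece)
def altStep (st : List (List Char) × List Char) (c : Char) : List (List Char) × List Char :=
  if sepChars.contains c then (if st.2 ≠ [] then (st.1 ++ [st.2], []) else (st.1, []))
  else (st.1, st.2 ++ [c])

def normalizar_clave_py_alt (variable_name : Option String) (sensor_name : Option String) : String :=
  let t := textoOf variable_name sensor_name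
  match findRule ruleTable t with
  | some key => key
  | none =>
    let base := (pyOrStr sensor_name (pyOrStr variable_name "unknown")).toList
    let st := base.foldl altStep ([], [])
    let parts := if st.2 ≠ [] then st.1 ++ [st.2] else st.1
    String.mk (PySem.Chars.join ['_'] parts)

-- ===== PRECONDITION & SPEC =====
def Spec_normalizar_clave_py (variable_name : Option String) (sensor_name : Option String) (out : String) : Prop := out = normalizar_clave_py_alt variable_name sensor_name
instance (variable_name : Option String) (sensor_name : Option String) (out : String) : Decidable (Spec_normalizar_clave_py variable_name sensor_name out) := by unfold Spec_normalizar_clave_py; infer_instance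

-- ===== CLAIM (what is proved, stated in full; the proofs are below) =====
def Claim_equal_normalizar_clave_py : Prop := ∀ (variable_name : Option String) (sensor_name : Option String), Dom_normalizar_clave_py variable_name sensor_name → Spec_normalizar_clave_py variable_name sensor_name (normalizar_clave_py variable_name sensor_name)

-- ===== LEMMAS AND PROOFS =====

-- split a char list at separators (as decided by p): (first piece, remaining pieces)
def splitU (p : Char → Bool) : List Char → List Char × List (List Char)
| [] => ([], [])
| c :: t =>
  let r := splitU p t
  if p c then ([], r.1 :: r.2) else (c :: r.1, r.2)

-- the nonempty pieces of s, split at separators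
def nparts (p : Char → Bool) (s : List Char) : List (List Char) :=
  ((splitU p s).1 :: (splitU p s).2).filter (· ≠ [])

def pU : Char → Bool := fun c => c = '_'

theorem nparts_sep (p : Char → Bool) (c : Char) (hc : p c = true) (t : List Char) :
    nparts p (c :: t) = nparts p t := by
  simp [nparts, splitU, hc, List.filter]

theorem nparts_cons (p : Char → Bool) (c : Char) (hc : p c = false) (t : List Char) :
    nparts p (c :: t) = (c :: (splitU p t).1) :: (splitU p t).2.filter (· ≠ []) := by
  simp [nparts, splitU, hc, List.filter]

theorem filter2_eq_of (p : Char → Bool) (x y : List Char)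
    (h1 : (splitU p x).1 = (splitU p y).1) (h : nparts p x = nparts p y) :
    (splitU p x).2.filter (· ≠ []) = (splitU p y).2.filter (· ≠ []) := by
  simp only [nparts, List.filter_cons, h1] at h
  simp only [ne_eq, decide_not] at h ⊢
  split at h <;> simp_all

theorem splitU_fst_nparts_collapse2 (l : List Char) :
    (splitU pU (collapse2 l)).1 = (splitU pU l).1 ∧ nparts pU (collapse2 l) = nparts pU l := by
  fun_induction collapse2 l with
  | case1 => exact ⟨rfl, rfl⟩
  | case2 c => exact ⟨rfl, rfl⟩
  | case3 c d t h ih =>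
    obtain ⟨rfl, rfl⟩ := h
    have hu : pU '_' = true := by simp [pU]
    refine ⟨?_, ?_⟩
    · simp [splitU, hu, ih.1]
    · rw [nparts_sep pU _ hu, nparts_sep pU _ hu, nparts_sep pU _ hu, ih.2]
  | case4 c d t h ih =>
    by_cases hc : c = '_'
    · subst hc
      have hu : pU '_' = true := by simp [pU]
      refine ⟨by simp [splitU, hu], ?_⟩
      rw [nparts_sep pU _ hu, nparts_sep pU _ hu, ih.2]
    · have hc' : pU c = false := by simp [pU, hc]
      refine ⟨by simp [splitU, hc', ih.1], ?_⟩
      rw [nparts_cons pU _ hc', nparts_cons pU _ hc', ih.1,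
        filter2_eq_of pU _ _ ih.1 ih.2]

theorem nparts_whileCollapse (l : List Char) :
    nparts pU (whileCollapse l) = nparts pU l := by
  fun_induction whileCollapse l with
  | case1 l h ih => rw [ih, replace2_eq, (splitU_fst_nparts_collapse2 l).2]
  | case2 l h => rfl

theorem whileCollapse_no_doubles (l : List Char) :
    PySem.Chars.isIn ['_','_'] (whileCollapse l) = false := by
  fun_induction whileCollapse l with
  | case1 l h ih => exact ih
  | case2 l h => simpa using h

theorem join_cons_head (sep : List Char) (c : Char) (h : List Char) (R : List (List Char)) :
    PySem.Chars.join sep ((c :: h) :: R) = c :: PySem.Chars.join sep (h :: R) := by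
  cases R <;> simp [PySem.Chars.join, List.intercalate]

theorem nd_tail {c : Char} {t : List Char} (h : ¬ ['_','_'] <:+: c :: t) : ¬ ['_','_'] <:+: t :=
  fun hi => h (List.infix_cons hi)

theorem nd_prefix {v w : List Char} (hp : v <+: w) (h : ¬ ['_','_'] <:+: w) : ¬ ['_','_'] <:+: v :=
  fun hi => h (hi.trans hp.isInfix)

theorem join_nparts_clean_aux : ∀ (n : Nat) (v : List Char), v.length ≤ n →
    ¬ ['_','_'] <:+: v → (v = [] ∨ v.getLast? ≠ some '_') →
    PySem.Chars.join ['_'] (nparts pU v) = v.dropWhile pU := by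
  intro n
  induction n with
  | zero =>
    intro v hv _ _
    have : v = [] := by cases v <;> simp_all
    subst this; rfl
  | succ n ih =>
    intro v hv hnd hl
    match v with
    | [] => rfl
    | c :: t =>
      simp only [List.length_cons] at hv
      by_cases hc : c = '_'
      · subst hc
        have hu : pU '_' = true := by simp [pU]
        rw [nparts_sep pU _ hu]
        have ht : t ≠ [] := by
          rintro rfl
          rcases hl with h | h <;> simp_all
        have hl' : t = [] ∨ t.getLast? ≠ some '_' := by
          right
          rcases hl with h | h
          · simp_all
          · cases t with
            | nil => simp_all
            | cons d t2 => rwa [List.getLast?_cons_cons] at h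
        rw [ih t (by omega) (nd_tail hnd) hl']
        simp [List.dropWhile_cons, hu]
      · have hc' : pU c = false := by simp [pU, hc]
        have hdw : (c :: t).dropWhile pU = c :: t := by
          simp [List.dropWhile_cons, hc']
        rw [hdw]
        cases t with
        | nil => simp [nparts, splitU, hc', List.filter, PySem.Chars.join, List.intercalate]
        | cons d t2 =>
          by_cases hd : d = '_'
          · subst hd
            cases t2 with
            | nil =>
              exfalso
              rcases hl with h | h <;> simp_all
            | cons e t3 =>
              have he : e ≠ '_' := by
                rintro rfl
                exact hnd ⟨[c], t3, rfl⟩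
              have hu : pU '_' = true := by simp [pU]
              have he' : pU e = false := by simp [pU, he]
              have h1 : nparts pU (c :: '_' :: e :: t3) = [c] :: nparts pU (e :: t3) := by
                simp [nparts, splitU, hc', hu, he', List.filter]
              rw [h1]
              have hl2 : e :: t3 = [] ∨ (e :: t3).getLast? ≠ some '_' := by
                right
                rcases hl with h | h
                · simp_all
                · rwa [List.getLast?_cons_cons, List.getLast?_cons_cons] at h
              have ih2 : PySem.Chars.join ['_'] (nparts pU (e :: t3)) = (e :: t3).dropWhile pU :=
                ih (e :: t3) (by simp only [List.length_cons] at *; omega)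
                  (nd_tail (nd_tail hnd)) hl2
              have hne : nparts pU (e :: t3) ≠ [] := by
                simp [nparts, splitU, he', List.filter]
              rw [show ([c] : List Char) = c :: [] from rfl, join_cons_head]
              cases hq : nparts pU (e :: t3) with
              | nil => exact absurd hq hne
              | cons q qs =>
                rw [hq] at ih2
                rw [show PySem.Chars.join ['_'] ([] :: q :: qs)
                      = '_' :: PySem.Chars.join ['_'] (q :: qs) by
                  simp [PySem.Chars.join, List.intercalate]]
                rw [ih2]
                simp [List.dropWhile_cons, he']
          · have hd' : pU d = false := by simp [pU, hd]
            have h1 : nparts pU (c :: d :: t2)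
                = (c :: d :: (splitU pU t2).1) :: (splitU pU t2).2.filter (· ≠ []) := by
              simp [nparts, splitU, hc', hd', List.filter]
            have h2 : nparts pU (d :: t2)
                = (d :: (splitU pU t2).1) :: (splitU pU t2).2.filter (· ≠ []) := by
              simp [nparts, splitU, hd', List.filter]
            have ih2 : PySem.Chars.join ['_'] (nparts pU (d :: t2)) = (d :: t2).dropWhile pU := by
              refine ih (d :: t2) (by simp only [List.length_cons] at *; omega) (nd_tail hnd) ?_
              right
              rcases hl with h | h
              · simp_all
              · rwa [List.getLast?_cons_cons] at h
            rw [h1, join_cons_head, ← h2, ih2]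
            simp [List.dropWhile_cons, hd']

theorem join_nparts_of_clean (v : List Char) (hnd : ¬ ['_','_'] <:+: v)
    (hl : v = [] ∨ v.getLast? ≠ some '_') :
    PySem.Chars.join ['_'] (nparts pU v) = v.dropWhile pU :=
  join_nparts_clean_aux v.length v le_rfl hnd hl

theorem splitU_append_sep (v : List Char) :
    splitU pU (v ++ ['_']) = ((splitU pU v).1, (splitU pU v).2 ++ [[]]) := by
  induction v with
  | nil => simp [splitU, pU]
  | cons c t ih =>
    by_cases hc : pU c = true <;> simp [splitU, hc, ih]

theorem nparts_append_sep (v : List Char) :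
    nparts pU (v ++ ['_']) = nparts pU v := by
  simp [nparts, splitU_append_sep, List.filter_append, List.filter_cons]

theorem dropWhile_of_head {s : List Char} (h : s = [] ∨ s.head? ≠ some '_') :
    s.dropWhile pU = s := by
  cases s with
  | nil => rfl
  | cons c t =>
    rcases h with h | h
    · simp_all
    · have : pU c = false := by
        simp only [List.head?_cons, ne_eq, Option.some.injEq] at h
        simp [pU, h]
      simp [List.dropWhile_cons, this]

theorem rstrip_aux : ∀ (n : Nat) (s : List Char), s.length ≤ n →
    ¬ ['_','_'] <:+: s → (s = [] ∨ s.head? ≠ some '_') →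
    PySem.Chars.join ['_'] (nparts pU s) = (s.reverse.dropWhile pU).reverse := by
  intro n
  induction n with
  | zero =>
    intro s hs _ _
    have : s = [] := by cases s <;> simp_all
    subst this; rfl
  | succ n ih =>
    intro s hs hnd hh
    rcases s.eq_nil_or_concat with rfl | ⟨v, d, rfl⟩
    all_goals try simp only [List.concat_eq_append] at *
    · rfl
    · by_cases hd : d = '_'
      · subst hd
        have hu : pU '_' = true := by simp [pU]
        rw [nparts_append_sep]
        have hrev : (v ++ ['_']).reverse.dropWhile pU = v.reverse.dropWhile pU := by
          simp [List.reverse_append, List.dropWhile_cons, hu]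
        rw [hrev]
        refine ih v ?_ (nd_prefix ⟨['_'], rfl⟩ hnd) ?_
        · simp only [List.length_append, List.length_cons, List.length_nil] at hs ⊢; omega
        · rcases hh with h | h
          · simp_all
          · cases v with
            | nil => simp
            | cons a tv => right; simpa using h
      · have hd' : pU d = false := by simp [pU, hd]
        have hlast : v ++ [d] = [] ∨ (v ++ [d]).getLast? ≠ some '_' := by
          right
          rw [List.getLast?_concat]
          simp [hd]
        rw [join_nparts_of_clean _ hnd hlast, dropWhile_of_head hh]
        have : (v ++ [d]).reverse.dropWhile pU = (v ++ [d]).reverse := by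
          simp [List.reverse_append, List.dropWhile_cons, hd']
        rw [this, List.reverse_reverse]

theorem stripChars_eq_join_nparts (s : List Char) (hnd : ¬ ['_','_'] <:+: s) :
    PySem.Chars.stripChars s ['_'] = PySem.Chars.join ['_'] (nparts pU s) := by
  have hfun : (fun c => (['_'] : List Char).contains c) = pU := by
    funext c
    simp [List.contains_eq_mem, pU]
  induction s with
  | nil => rfl
  | cons c t ih =>
    by_cases hc : c = '_'
    · subst hc
      have hu : pU '_' = true := by simp [pU]
      have h1 : PySem.Chars.stripChars ('_' :: t) ['_'] = PySem.Chars.stripChars t ['_'] := by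
        simp only [PySem.Chars.stripChars, hfun]
        rw [List.dropWhile_cons_of_pos (by simp [hu])]
      rw [h1, ih (nd_tail hnd), nparts_sep pU _ hu]
    · have hc' : pU c = false := by simp [pU, hc]
      have hh : c :: t = [] ∨ (c :: t).head? ≠ some '_' := by
        right; simp [hc]
      have h1 : PySem.Chars.stripChars (c :: t) ['_']
          = ((c :: t).reverse.dropWhile pU).reverse := by
        simp only [PySem.Chars.stripChars, hfun]
        rw [dropWhile_of_head hh]
      rw [h1, ← rstrip_aux (c :: t).length (c :: t) le_rfl hnd hh]

-- single-character replace is a map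
theorem go1_eq (a b : Char) (fuel : Nat) : ∀ (l acc : List Char), l.length ≤ fuel →
    PySem.Chars.replace.go [a] [b] fuel l acc
      = acc.reverse ++ l.map (fun c => if c = a then b else c) := by
  induction fuel with
  | zero =>
    intro l acc h
    have : l = [] := by cases l <;> simp_all
    subst this; simp [PySem.Chars.replace.go]
  | succ n ih =>
    intro l acc h
    match l with
    | [] => simp [PySem.Chars.replace.go]
    | c :: t =>
      simp only [List.length_cons] at h
      rw [PySem.Chars.replace.go]
      by_cases hc : c = a
      · subst hc
        have h1 : ([c].isPrefixOf (c :: t)) = true := by simp [List.isPrefixOf]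
        rw [h1, if_pos rfl, show List.drop [c].length (c :: t) = t from rfl,
          ih _ _ (by omega)]
        simp
      · have h1 : ([a].isPrefixOf (c :: t)) = false := by
          simp only [List.isPrefixOf, Bool.and_eq_false_iff, beq_eq_false_iff_ne, ne_eq]
          left; exact fun hh => hc hh.symm
        rw [h1]
        simp only [Bool.false_eq_true, if_false]
        rw [ih _ _ (by omega)]
        simp [hc]

theorem replace1_eq (a b : Char) (l : List Char) :
    PySem.Chars.replace l [a] [b] = l.map (fun c => if c = a then b else c) := by
  simp [PySem.Chars.replace, go1_eq a b l.length l [] le_rfl]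


def sub4 (c : Char) : Char := if c = ' ' ∨ c = '-' ∨ c = '/' ∨ c = '_' then '_' else c

theorem replace3_eq (l : List Char) :
    PySem.Chars.replace (PySem.Chars.replace (PySem.Chars.replace l [' '] ['_']) ['-'] ['_']) ['/'] ['_']
      = l.map sub4 := by
  simp only [replace1_eq, List.map_map]
  refine List.map_congr_left (fun c _ => ?_)
  simp only [Function.comp_apply, sub4]
  by_cases h1 : c = ' ' <;> by_cases h2 : c = '-' <;> by_cases h3 : c = '/' <;>
    by_cases h4 : c = '_' <;> simp_all

theorem splitU_map_sub4 (l : List Char) :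
    splitU pU (l.map sub4) = splitU (fun c => sepChars.contains c) l := by
  induction l with
  | nil => rfl
  | cons c t ih =>
    by_cases h : sepChars.contains c = true
    · have h1 : pU (sub4 c) = true := by
        simp only [sepChars, List.contains_eq_mem, List.mem_cons] at h
        simp [pU, sub4]
        simp_all
      have hm : c ∈ sepChars := by simpa [List.contains_eq_mem] using h
      simp [splitU, h1, ih, hm]
    · have hmem : ¬ (c = ' ' ∨ c = '-' ∨ c = '/' ∨ c = '_') := by
        simp only [sepChars, List.contains_eq_mem, List.mem_cons] at h
        simp_all
      have h1 : sub4 c = c := by simp [sub4, hmem]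
      have h2 : pU c = false := by
        simp only [pU]; simp only [decide_eq_false_iff_not]
        intro hc; exact hmem (Or.inr (Or.inr (Or.inr hc)))
      have hm : c ∉ sepChars := by simpa [List.contains_eq_mem] using h
      simp [splitU, h1, h2, ih, hm]

theorem nparts_map_sub4 (l : List Char) :
    nparts pU (l.map sub4) = nparts (fun c => sepChars.contains c) l := by
  simp [nparts, splitU_map_sub4]

theorem splitU_sepfree_append (p : Char → Bool) (cur : List Char)
    (hc : ∀ c ∈ cur, p c = false) (x : List Char) :
    splitU p (cur ++ x) = (cur ++ (splitU p x).1, (splitU p x).2) := by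
  induction cur with
  | nil => simp
  | cons c t ih =>
    have h1 : p c = false := hc c (by simp)
    simp [splitU, h1, ih (fun d hd => hc d (by simp [hd]))]

theorem nparts_sepfree (p : Char → Bool) (cur : List Char) (hc : ∀ c ∈ cur, p c = false) :
    nparts p cur = if cur = [] then [] else [cur] := by
  have h0 := splitU_sepfree_append p cur hc []
  simp only [List.append_nil, show splitU p [] = ([], []) from rfl] at h0
  cases cur with
  | nil => rfl
  | cons a t => simp [nparts, h0, List.filter]

theorem nparts_sepfree_append_sep (p : Char → Bool) (cur : List Char)
    (hc : ∀ c ∈ cur, p c = false) (d : Char) (hd : p d = true) (t : List Char) :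
    nparts p (cur ++ d :: t) = (if cur = [] then [] else [cur]) ++ nparts p t := by
  rw [nparts, splitU_sepfree_append p cur hc]
  simp only [splitU, hd, if_true]
  simp only [nparts, List.filter_cons]
  split <;> split <;> simp_all [List.filter_cons]

theorem foldl_altStep (s : List Char) : ∀ (ps : List (List Char)) (cur : List Char),
    (∀ c ∈ cur, sepChars.contains c = false) →
    (if (s.foldl altStep (ps, cur)).2 ≠ [] then
       (s.foldl altStep (ps, cur)).1 ++ [(s.foldl altStep (ps, cur)).2]
     else (s.foldl altStep (ps, cur)).1)
      = ps ++ nparts (fun c => sepChars.contains c) (cur ++ s) := by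
  induction s with
  | nil =>
    intro ps cur hc
    simp only [List.foldl_nil, List.append_nil]
    rw [nparts_sepfree _ cur hc]
    split <;> simp_all
  | cons c t ih =>
    intro ps cur hc
    by_cases h : sepChars.contains c = true
    · by_cases hcur : cur = []
      · subst hcur
        simp only [List.foldl_cons, altStep, h, if_true, ne_eq, not_true_eq_false,
          if_false, List.nil_append]
        rw [ih ps [] (by simp),
          nparts_sep (fun c => sepChars.contains c) c (by exact h) t]
        simp
      · simp only [List.foldl_cons, altStep, h, if_true, ne_eq, hcur, not_false_eq_true,
          if_true]
        rw [ih (ps ++ [cur]) [] (by simp),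
          nparts_sepfree_append_sep (fun c => sepChars.contains c) cur hc c (by exact h) t]
        simp [hcur]
    · simp only [List.foldl_cons, altStep, h, Bool.false_eq_true, if_false]
      rw [ih ps (cur ++ [c]) (by intro d hd; rcases List.mem_append.1 hd with h1 | h1
                                 · exact hc d h1
                                 · simp at h1; subst h1; simpa using h)]
      simp

theorem fallback_eq (base : List Char) :
    PySem.Chars.stripChars (whileCollapse
      (PySem.Chars.replace (PySem.Chars.replace (PySem.Chars.replace base [' '] ['_']) ['-'] ['_']) ['/'] ['_'])) ['_']
    = PySem.Chars.join ['_']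
        (if (base.foldl altStep ([], [])).2 ≠ [] then
           (base.foldl altStep ([], [])).1 ++ [(base.foldl altStep ([], [])).2]
         else (base.foldl altStep ([], [])).1) := by
  rw [replace3_eq, foldl_altStep base [] [] (by simp)]
  simp only [List.nil_append]
  rw [← nparts_map_sub4,
    ← nparts_whileCollapse (base.map sub4),
    stripChars_eq_join_nparts _ (by
      have h := whileCollapse_no_doubles (base.map sub4)
      exact (PySem.Chars.isIn_eq_false_iff _ _).1 h)]

-- ===== VERDICT (by name: the statement is the Claim_ definition above) =====
theorem normalizar_clave_py_spec : Claim_equal_normalizar_clave_py := by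
  intro variable_name sensor_name _
  unfold Spec_normalizar_clave_py normalizar_clave_py normalizar_clave_py_alt
  simp only [findRule, ruleTable, List.any_cons, List.any_nil, Bool.or_false,
    Bool.not_false, Bool.and_true, Bool.or_assoc]
  set t := textoOf variable_name sensor_name with ht
  by_cases h1 : (PySem.Chars.isIn "bar".toList t && !PySem.Chars.isIn "bar_trend".toList t) = true
  · simp only [h1, eq_self_iff_true, if_true]
  simp only [Bool.not_eq_true] at h1
  simp only [h1, Bool.false_eq_true, if_false]
  by_cases h2 : (PySem.Chars.isIn "dew_point_out".toList t || PySem.Chars.isIn "dew point out".toList t) = true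
  · simp only [h2, eq_self_iff_true, if_true]
  simp only [Bool.not_eq_true] at h2
  simp only [h2, Bool.false_eq_true, if_false]
  by_cases h3 : (PySem.Chars.isIn "heat_index_out".toList t || PySem.Chars.isIn "heat index out".toList t) = true
  · simp only [h3, eq_self_iff_true, if_true]
  simp only [Bool.not_eq_true] at h3
  simp only [h3, Bool.false_eq_true, if_false]
  by_cases h4 : (PySem.Chars.isIn "temp_in".toList t || PySem.Chars.isIn "indoor".toList t) = true
  · simp only [h4, eq_self_iff_true, if_true]
  simp only [Bool.not_eq_true] at h4
  simp only [h4, Bool.false_eq_true, if_false]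
  by_cases h5 : (PySem.Chars.isIn "temp_out".toList t || PySem.Chars.isIn "outdoor temperature".toList t) = true
  · simp only [h5, eq_self_iff_true, if_true]
  simp only [Bool.not_eq_true] at h5
  simp only [h5, Bool.false_eq_true, if_false]
  by_cases h6 : (PySem.Chars.isIn "rainfall".toList t || PySem.Chars.isIn "rain".toList t) = true
  · simp only [h6, eq_self_iff_true, if_true]
  simp only [Bool.not_eq_true] at h6
  simp only [h6, Bool.false_eq_true, if_false]
  by_cases h7 : (PySem.Chars.isIn "wind_chill".toList t) = true
  · simp only [h7, eq_self_iff_true, if_true]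
  simp only [Bool.not_eq_true] at h7
  simp only [h7, Bool.false_eq_true, if_false]
  by_cases h8 : (PySem.Chars.isIn "wind_dir_of_prevail".toList t || (PySem.Chars.isIn "wind direction".toList t || PySem.Chars.isIn "wind_dir".toList t)) = true
  · simp only [h8, eq_self_iff_true, if_true]
  simp only [Bool.not_eq_true] at h8
  simp only [h8, Bool.false_eq_true, if_false]
  by_cases h9 : (PySem.Chars.isIn "wind_speed_avg".toList t || PySem.Chars.isIn "wind speed avg".toList t) = true
  · simp only [h9, eq_self_iff_true, if_true]
  simp only [Bool.not_eq_true] at h9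
  simp only [h9, Bool.false_eq_true, if_false]
  by_cases h10 : (PySem.Chars.isIn "wind_speed".toList t || PySem.Chars.isIn "wind speed".toList t) = true
  · simp only [h10, eq_self_iff_true, if_true]
  simp only [Bool.not_eq_true] at h10
  simp only [h10, Bool.false_eq_true, if_false]
  by_cases h11 : (PySem.Chars.isIn "hum_out".toList t || (PySem.Chars.isIn "humidity out".toList t || PySem.Chars.isIn "humedad exterior".toList t)) = true
  · simp only [h11, eq_self_iff_true, if_true]
  simp only [Bool.not_eq_true] at h11
  simp only [h11, Bool.false_eq_true, if_false]
  exact congrArg String.mk (fallback_eq _)
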